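-- pv_equiv track=rewrite | github.com/ed18s007/MiRL | MIRL/ISBI/ODIR/reduce.py | my_indy
-- ===== SOURCE A (Python) =====
-- def my_indy(arr, height):
-- 	first = 0
-- 	for i in range(height):
-- 		if(arr[i] == 0):
-- 			first = i
-- 		elif(arr[i]>0):
-- 			break
-- 	return first
-- ===== SOURCE B (Python) =====
-- def my_indy(arr, height):
--     # find cutoff: first index below height with a positive value
--     cutoff = next((i for i in range(height) if arr[i] > 0), height)
--     # scan backwards from cutoff-1 for the first zero
--     for i in range(cutoff - 1, -1, -1):
--         if arr[i] == 0:
--             return i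
--     return 0
-- ===== Notes on version B (the rewrite author's own statement) =====
-- stated objective: alternative
-- what changed: Replaces the single forward early-breaking loop with a last-zero accumulator by two passes: find the cutoff (first positive index, default height), then scan backwards from cutoff-1 for the first zero.
import Mathlib
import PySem

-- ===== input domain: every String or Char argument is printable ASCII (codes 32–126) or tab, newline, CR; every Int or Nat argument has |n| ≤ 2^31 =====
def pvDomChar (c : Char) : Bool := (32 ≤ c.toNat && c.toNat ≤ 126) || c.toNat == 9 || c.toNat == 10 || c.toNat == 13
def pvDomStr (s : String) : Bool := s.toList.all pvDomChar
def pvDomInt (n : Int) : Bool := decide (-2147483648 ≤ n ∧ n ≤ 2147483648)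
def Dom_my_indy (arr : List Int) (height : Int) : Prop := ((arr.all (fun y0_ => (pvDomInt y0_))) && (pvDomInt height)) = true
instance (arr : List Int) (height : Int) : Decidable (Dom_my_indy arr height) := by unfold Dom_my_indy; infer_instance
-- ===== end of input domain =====

-- B replaces A's single forward early-breaking loop (last-zero accumulator) by two passes:
-- find the cutoff = first positive index (default height), then scan backwards for the first zero.


-- ===== PORT A =====
-- A's loop over `for i in range(height)`: like Python's lazy range, the port counts fuel
-- down while the index counts up, so the early `break` stops it early; accumulator `first`;
-- on IndexError (pyGet? = none, excluded by Pre_) it just returns the accumulator.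
def myIndyLoopA (arr : List Int) : Nat → Int → Int → Int
  | 0, _, first => first
  | fuel + 1, i, first =>
    match PySem.List.pyGet? arr i with
    | none => first
    | some v => if v = 0 then myIndyLoopA arr fuel (i + 1) i
                else if v > 0 then first
                else myIndyLoopA arr fuel (i + 1) first

def my_indy (arr : List Int) (height : Int) : Int :=
  myIndyLoopA arr height.toNat 0 0

-- ===== PORT B =====
-- first pass `next((i for i in range(height) if arr[i] > 0), height)`: first index with a
-- positive value, default height; lazy range = fuel countdown (IndexError excluded by Pre_)
def myIndyCutoff (arr : List Int) (d : Int) : Nat → Int → Int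
  | 0, _ => d
  | fuel + 1, i =>
    match PySem.List.pyGet? arr i with
    | none => d
    | some v => if v > 0 then i else myIndyCutoff arr d fuel (i + 1)

-- second pass `for i in range(cutoff - 1, -1, -1)`: backward scan for the first zero, default 0
def myIndyBack (arr : List Int) : Nat → Int → Int
  | 0, _ => 0
  | fuel + 1, i =>
    match PySem.List.pyGet? arr i with
    | none => 0
    | some v => if v = 0 then i else myIndyBack arr fuel (i - 1)

def my_indy_alt (arr : List Int) (height : Int) : Int :=
  let cutoff := myIndyCutoff arr height height.toNat 0
  myIndyBack arr cutoff.toNat (cutoff - 1)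

-- ===== PRECONDITION & SPEC =====
-- Exactly where the Python A returns: it raises IndexError iff height > len(arr) and arr has no positive element.
def Pre_my_indy (arr : List Int) (height : Int) : Prop :=
  height ≤ arr.length ∨ ∃ x ∈ arr, 0 < x
instance (arr : List Int) (height : Int) : Decidable (Pre_my_indy arr height) := by unfold Pre_my_indy; infer_instance

def pvWitness_my_indy : List Int × Int := ([0, -1, 0, 2, 0], 4)

def Spec_my_indy (arr : List Int) (height : Int) (out : Int) : Prop := out = my_indy_alt arr height
instance (arr : List Int) (height : Int) (out : Int) : Decidable (Spec_my_indy arr height out) := by unfold Spec_my_indy; infer_instance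

-- ===== CLAIM (what is proved, stated in full; the proofs are below) =====
def Claim_equal_my_indy : Prop := ∀ (arr : List Int) (height : Int), Dom_my_indy arr height → Pre_my_indy arr height → Spec_my_indy arr height (my_indy arr height)

-- ===== LEMMAS AND PROOFS =====

-- List-of-indices versions of the three loops (proof helpers only)
def pvLoopA (arr : List Int) : List Int → Int → Int
  | [], first => first
  | i :: rest, first =>
    match PySem.List.pyGet? arr i with
    | none => first
    | some v => if v = 0 then pvLoopA arr rest i
                else if v > 0 then first
                else pvLoopA arr rest first

def pvCutoffL (arr : List Int) (d : Int) : List Int → Int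
  | [] => d
  | i :: rest =>
    match PySem.List.pyGet? arr i with
    | none => d
    | some v => if v > 0 then i else pvCutoffL arr d rest

def pvBackL (arr : List Int) : List Int → Int
  | [] => 0
  | i :: rest =>
    match PySem.List.pyGet? arr i with
    | none => 0
    | some v => if v = 0 then i else pvBackL arr rest

-- Bridges: the fuel loops agree with the list loops over the corresponding range
theorem loopA_bridge (arr : List Int) :
    ∀ (n : Nat) (i f : Int),
      myIndyLoopA arr n i f = pvLoopA arr (PySem.List.pyRange i (i + n) 1) f := by
  intro n
  induction n with
  | zero =>
    intro i f
    rw [show i + ((0 : Nat) : Int) = i by push_cast; ring,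
      PySem.List.pyRange_one_eq_nil (le_refl i)]
    rfl
  | succ n ih =>
    intro i f
    rw [PySem.List.pyRange_one_cons (show i < i + ((n + 1 : Nat) : Int) by push_cast; omega)]
    have harg : (i + 1) + (n : Int) = i + ((n + 1 : Nat) : Int) := by push_cast; ring
    cases hgi : PySem.List.pyGet? arr i with
    | none => simp only [myIndyLoopA, pvLoopA, hgi]
    | some v =>
      simp only [myIndyLoopA, pvLoopA, hgi]
      by_cases hz : v = 0
      · simp only [if_pos hz, ← harg]
        exact ih (i + 1) i
      · by_cases hp : v > 0
        · simp only [if_neg hz, if_pos hp]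
        · simp only [if_neg hz, if_neg hp, ← harg]
          exact ih (i + 1) f

theorem cutoff_bridge (arr : List Int) (d : Int) :
    ∀ (n : Nat) (i : Int),
      myIndyCutoff arr d n i = pvCutoffL arr d (PySem.List.pyRange i (i + n) 1) := by
  intro n
  induction n with
  | zero =>
    intro i
    rw [show i + ((0 : Nat) : Int) = i by push_cast; ring,
      PySem.List.pyRange_one_eq_nil (le_refl i)]
    rfl
  | succ n ih =>
    intro i
    rw [PySem.List.pyRange_one_cons (show i < i + ((n + 1 : Nat) : Int) by push_cast; omega)]
    have harg : (i + 1) + (n : Int) = i + ((n + 1 : Nat) : Int) := by push_cast; ring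
    cases hgi : PySem.List.pyGet? arr i with
    | none => simp only [myIndyCutoff, pvCutoffL, hgi]
    | some v =>
      simp only [myIndyCutoff, pvCutoffL, hgi]
      by_cases hp : v > 0
      · simp only [if_pos hp]
      · simp only [if_neg hp, ← harg]
        exact ih (i + 1)

theorem back_bridge (arr : List Int) :
    ∀ (n : Nat) (i : Int),
      myIndyBack arr n i = pvBackL arr (PySem.List.pyRange i (i - n) (-1)) := by
  intro n
  induction n with
  | zero =>
    intro i
    rw [show i - ((0 : Nat) : Int) = i by push_cast; ring,
      PySem.List.pyRange_neg_one_eq_nil (le_refl i)]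
    rfl
  | succ n ih =>
    intro i
    rw [PySem.List.pyRange_neg_one_cons (show i - ((n + 1 : Nat) : Int) < i by push_cast; omega)]
    have harg : (i - 1) - (n : Int) = i - ((n + 1 : Nat) : Int) := by push_cast; ring
    cases hgi : PySem.List.pyGet? arr i with
    | none => simp only [myIndyBack, pvBackL, hgi]
    | some v =>
      simp only [myIndyBack, pvBackL, hgi]
      by_cases hz : v = 0
      · simp only [if_pos hz]
      · simp only [if_neg hz, ← harg]
        exact ih (i - 1)

/-- Proof helper: index `i` is valid for `arr` and holds a non-positive value. -/
def pvNPV (arr : List Int) (i : Int) : Prop :=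
  ∃ v, PySem.List.pyGet? arr i = some v ∧ v ≤ 0

/-- Proof helper: `pvBackL` generalized over its "not found" default. -/
def pvBsw (arr : List Int) : List Int → Int → Int
  | [], f => f
  | i :: r, f =>
    match PySem.List.pyGet? arr i with
    | none => f
    | some v => if v = 0 then i else pvBsw arr r f

theorem pvBsw_append (arr : List Int) (xs ys : List Int) (f : Int)
    (h : ∀ j ∈ xs, PySem.List.pyGet? arr j ≠ none) :
    pvBsw arr (xs ++ ys) f = pvBsw arr xs (pvBsw arr ys f) := by
  induction xs with
  | nil => simp [pvBsw]
  | cons i xs ih =>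
    have hi := h i (List.mem_cons_self)
    cases hg : PySem.List.pyGet? arr i with
    | none => exact absurd hg hi
    | some v =>
      simp only [List.cons_append, pvBsw, hg]
      split
      · rfl
      · exact ih (fun j hj => h j (List.mem_cons_of_mem _ hj))

theorem pvBackL_eq_pvBsw (arr : List Int) (L : List Int) :
    pvBackL arr L = pvBsw arr L 0 := by
  induction L with
  | nil => rfl
  | cons i r ih =>
    simp only [pvBackL, pvBsw]
    cases PySem.List.pyGet? arr i with
    | none => rfl
    | some v => split <;> simp [ih]

theorem pvLoopA_rev (arr : List Int) (L : List Int) (h : ∀ i ∈ L, pvNPV arr i) (f : Int) :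
    pvLoopA arr L f = pvBsw arr L.reverse f := by
  induction L generalizing f with
  | nil => rfl
  | cons i rest ih =>
    obtain ⟨v, hg, hv⟩ := h i (List.mem_cons_self)
    have hvalid : ∀ j ∈ rest.reverse, PySem.List.pyGet? arr j ≠ none := by
      intro j hj
      obtain ⟨w, hw, _⟩ := h j (List.mem_cons_of_mem _ (List.mem_reverse.mp hj))
      simp [hw]
    simp only [pvLoopA, hg, List.reverse_cons,
      pvBsw_append arr rest.reverse [i] f hvalid]
    have hnp : ¬ v > 0 := by omega
    by_cases hz : v = 0
    · simp only [pvBsw, hg, hz]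
      exact ih (fun j hj => h j (List.mem_cons_of_mem _ hj)) i
    · simp only [if_neg hz, if_neg hnp, pvBsw, hg]
      exact ih (fun j hj => h j (List.mem_cons_of_mem _ hj)) f

theorem pvLoopA_break (arr : List Int) (P S : List Int) (c w : Int)
    (hP : ∀ i ∈ P, pvNPV arr i) (hc : PySem.List.pyGet? arr c = some w) (hw : 0 < w) (f : Int) :
    pvLoopA arr (P ++ c :: S) f = pvLoopA arr P f := by
  induction P generalizing f with
  | nil =>
    have hz : ¬ w = 0 := by omega
    simp [pvLoopA, hc, hz, hw]
  | cons i P' ih =>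
    obtain ⟨v, hg, hv⟩ := hP i (List.mem_cons_self)
    have hP' : ∀ i ∈ P', pvNPV arr i := fun j hj => hP j (List.mem_cons_of_mem _ hj)
    have hnp : ¬ v > 0 := by omega
    by_cases hz : v = 0 <;> simp [pvLoopA, hg, hz, hnp, ih hP']

theorem pvCutoffL_all (arr : List Int) (d : Int) (L : List Int) (h : ∀ i ∈ L, pvNPV arr i) :
    pvCutoffL arr d L = d := by
  induction L with
  | nil => rfl
  | cons i rest ih =>
    obtain ⟨v, hg, hv⟩ := h i (List.mem_cons_self)
    have hnp : ¬ v > 0 := by omega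
    simp [pvCutoffL, hg, hnp, ih (fun j hj => h j (List.mem_cons_of_mem _ hj))]

theorem pvCutoffL_break (arr : List Int) (d : Int) (P S : List Int) (c w : Int)
    (hP : ∀ i ∈ P, pvNPV arr i) (hc : PySem.List.pyGet? arr c = some w) (hw : 0 < w) :
    pvCutoffL arr d (P ++ c :: S) = c := by
  induction P with
  | nil => simp [pvCutoffL, hc, hw]
  | cons i P' ih =>
    obtain ⟨v, hg, hv⟩ := hP i (List.mem_cons_self)
    have hnp : ¬ v > 0 := by omega
    simp [pvCutoffL, hg, hnp, ih (fun j hj => hP j (List.mem_cons_of_mem _ hj))]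

/-- First-failure decomposition of an ascending range under `pvNPV`. -/
theorem pv_split_range (arr : List Int) :
    ∀ (n : Nat) (a b : Int), (b - a).toNat = n →
    (∀ i ∈ PySem.List.pyRange a b 1, pvNPV arr i) ∨
    ∃ c, a ≤ c ∧ c < b ∧ (∀ i ∈ PySem.List.pyRange a c 1, pvNPV arr i) ∧ ¬ pvNPV arr c ∧
      PySem.List.pyRange a b 1 = PySem.List.pyRange a c 1 ++ c :: PySem.List.pyRange (c+1) b 1 := by
  intro n
  induction n with
  | zero =>
    intro a b hn
    left
    rw [PySem.List.pyRange_one_eq_nil (by omega)]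
    simp
  | succ n ih =>
    intro a b hn
    have hab : a < b := by omega
    have hcons := PySem.List.pyRange_one_cons (a := a) (b := b) hab
    by_cases ha : pvNPV arr a
    · rcases ih (a + 1) b (by omega) with hall | ⟨c, hac, hcb, hPre, hnc, hdec⟩
      · left
        intro i hi
        rw [hcons] at hi
        rcases List.mem_cons.mp hi with rfl | hi
        · exact ha
        · exact hall i hi
      · right
        refine ⟨c, by omega, hcb, ?_, hnc, ?_⟩
        · intro i hi
          rw [PySem.List.pyRange_one_cons (show a < c by omega)] at hi
          rcases List.mem_cons.mp hi with rfl | hi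
          · exact ha
          · exact hPre i hi
        · rw [hcons, hdec, PySem.List.pyRange_one_cons (show a < c by omega)]
          simp
    · right
      refine ⟨a, le_refl a, hab, ?_, ha, ?_⟩
      · intro i hi
        rw [PySem.List.pyRange_one_eq_nil (le_refl a)] at hi
        simp at hi
      · rw [PySem.List.pyRange_one_eq_nil (le_refl a), hcons]
        simp

-- Bridges instantiated at the ports' arguments
theorem my_indy_eq_list (arr : List Int) (height : Int) :
    my_indy arr height = pvLoopA arr (PySem.List.pyRange 0 height 1) 0 := by
  unfold my_indy
  rw [loopA_bridge]
  by_cases h : 0 ≤ height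
  · rw [show (0 : Int) + (height.toNat : Int) = height by omega]
  · rw [show (0 : Int) + (height.toNat : Int) = 0 by omega,
      PySem.List.pyRange_one_eq_nil (le_refl (0 : Int)),
      PySem.List.pyRange_one_eq_nil (show height ≤ 0 by omega)]

theorem my_indy_alt_eq_list (arr : List Int) (height : Int) :
    my_indy_alt arr height =
      pvBackL arr (PySem.List.pyRange
        (pvCutoffL arr height (PySem.List.pyRange 0 height 1) - 1) (-1) (-1)) := by
  unfold my_indy_alt
  rw [cutoff_bridge]
  by_cases h : 0 ≤ height
  · rw [show (0 : Int) + (height.toNat : Int) = height by omega]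
    set c := pvCutoffL arr height (PySem.List.pyRange 0 height 1) with hc
    rw [back_bridge]
    by_cases hc0 : 0 ≤ c
    · rw [show (c - 1) - (c.toNat : Int) = -1 by omega]
    · rw [show (c - 1) - (c.toNat : Int) = c - 1 by omega,
        PySem.List.pyRange_neg_one_eq_nil (le_refl (c - 1)),
        PySem.List.pyRange_neg_one_eq_nil (show c - 1 ≤ -1 by omega)]
  · rw [show (0 : Int) + (height.toNat : Int) = 0 by omega,
      PySem.List.pyRange_one_eq_nil (le_refl (0 : Int)),
      PySem.List.pyRange_one_eq_nil (show height ≤ 0 by omega)]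
    simp only [pvCutoffL]
    rw [back_bridge]
    rw [show (height - 1) - (height.toNat : Int) = height - 1 by omega,
      PySem.List.pyRange_neg_one_eq_nil (le_refl (height - 1)),
      PySem.List.pyRange_neg_one_eq_nil (show height - 1 ≤ -1 by omega)]

-- ===== VERDICT (by name: the statement is the Claim_ definition above) =====
theorem my_indy_spec : Claim_equal_my_indy := by
  intro arr height _ hpre
  unfold Spec_my_indy
  rw [my_indy_eq_list, my_indy_alt_eq_list]
  rcases pv_split_range arr (height - 0).toNat 0 height rfl with hall | ⟨c, hc0, hcb, hP, hnc, hdec⟩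
  · -- no positive (and no IndexError) in the whole range: cutoff = height
    rw [pvCutoffL_all arr height _ hall, pvLoopA_rev arr _ hall 0, pvBackL_eq_pvBsw]
    have : PySem.List.pyRange (height - 1) (-1) (-1)
        = (PySem.List.pyRange 0 height 1).reverse := by
      rw [PySem.List.pyRange_neg_one_eq_reverse]
      norm_num
    rw [this]
  · -- c is the first index that is not "valid and non-positive"; by Pre_ it holds a positive
    obtain ⟨w, hg, hw⟩ : ∃ w, PySem.List.pyGet? arr c = some w ∧ 0 < w := by
      cases hgc : PySem.List.pyGet? arr c with
      | none =>
        exfalso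
        rw [PySem.List.pyGet?_eq_none_iff] at hgc
        simp only [PySem.Raise.InRange] at hgc
        have hlen : (arr.length : Int) ≤ c := by omega
        rcases hpre with hle | ⟨x, hx, hxpos⟩
        · omega
        · obtain ⟨p, hp, rfl⟩ := List.getElem_of_mem hx
          have hmem : (p : Int) ∈ PySem.List.pyRange 0 c 1 := by
            rw [PySem.List.mem_pyRange_one]
            constructor <;> [positivity; omega]
          obtain ⟨v, hgv, hvle⟩ := hP _ hmem
          rw [PySem.List.pyGet?_natCast] at hgv
          rw [List.getElem?_eq_getElem hp] at hgv
          injection hgv with hgv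
          omega
      | some w =>
        refine ⟨w, rfl, ?_⟩
        by_contra hle
        exact hnc ⟨w, hgc, by omega⟩
    rw [hdec, pvLoopA_break arr _ _ c w hP hg hw 0, pvLoopA_rev arr _ hP 0,
      pvCutoffL_break arr height _ _ c w hP hg hw, pvBackL_eq_pvBsw]
    have : PySem.List.pyRange (c - 1) (-1) (-1)
        = (PySem.List.pyRange 0 c 1).reverse := by
      rw [PySem.List.pyRange_neg_one_eq_reverse]
      norm_num
    rw [this]
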